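-- pv_equiv track=rewrite | github.com/DanieleDiBari/utility | pytools.py | get_filetypes
-- ===== SOURCE A (Python) =====
-- def get_filetypes(fnames):
--     ftypes = dict()
--     for f in fnames:
--         fdot = len(f)-f[::-1].find('.')
--         fname = f[:fdot-1]
--         fext = f[fdot:]
--         if fname not in ftypes:
--             ftypes[fname] = [fext]
--         else:
--             ftypes[fname].append(fext)
--     return ftypes
-- ===== SOURCE B (Python) =====
-- def _split_ext(f):
--     i = f.rfind('.')
--     if i < 0:
--         return (f, '')
--     return (f[:i], f[i + 1:])
--
--
-- def get_filetypes(fnames):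
--     pairs = [_split_ext(f) for f in fnames]
--     bases = list(dict.fromkeys(b for b, _ in pairs))
--     return {b: [e for x, e in pairs if x == b] for b in bases}
-- ===== Notes on version B (the rewrite author's own statement) =====
-- stated objective: alternative
-- what changed: A grows a dict in one pass with insert-or-append per filename; B first splits every name into a (base, ext) pair at the last dot found by rfind, then deduplicates the bases in first-occurrence order and collects each base's extensions with a filtering pass.
import Mathlib
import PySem

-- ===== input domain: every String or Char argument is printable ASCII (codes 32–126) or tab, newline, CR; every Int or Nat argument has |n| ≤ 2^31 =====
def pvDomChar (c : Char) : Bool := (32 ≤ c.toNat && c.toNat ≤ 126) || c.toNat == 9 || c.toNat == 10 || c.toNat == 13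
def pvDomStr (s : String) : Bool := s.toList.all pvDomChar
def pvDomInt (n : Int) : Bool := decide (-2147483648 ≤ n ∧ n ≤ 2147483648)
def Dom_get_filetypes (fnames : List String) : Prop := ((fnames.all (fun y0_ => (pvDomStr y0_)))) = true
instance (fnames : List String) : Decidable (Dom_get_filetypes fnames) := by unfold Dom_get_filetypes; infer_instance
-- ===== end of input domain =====

-- B replaces A's incremental insert-or-append dict grouping with a two-phase split-then-group
-- (split each name at its last '.' via rfind, deduplicate the bases in first-occurrence order,
-- then collect each base's extensions by a filtering pass); objective: alternative.

-- ===== PORT A =====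
-- one loop body of A: locate the last '.' via the reversed string, split, insert-or-append
def pvStepA (ftypes : PySem.Dict String (List String)) (f : String) :
    PySem.Dict String (List String) :=
  let fdot : Int := (PySem.Str.len f : Int) -
    PySem.Str.find ((PySem.Str.slice? f none none (-1)).getD "") "."   -- f[::-1].find('.'); step -1 never raises
  let fname := PySem.Str.slice f none (some (fdot - 1))
  let fext := PySem.Str.slice f (some fdot) none
  if ftypes.contains fname then ftypes.modify fname [] (· ++ [fext])
  else ftypes.insert fname [fext]

def get_filetypes (fnames : List String) : List (String × List String) :=
  (fnames.foldl pvStepA PySem.Dict.empty).items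

-- ===== PORT B =====
-- B's helper _split_ext: split at the last '.' located by rfind
def splitExt (f : String) : String × String :=
  let i := PySem.Str.rfind f "."
  if i < 0 then (f, "")
  else (PySem.Str.slice f none (some i), PySem.Str.slice f (some (i + 1)) none)

def get_filetypes_alt (fnames : List String) : List (String × List String) :=
  let pairs := fnames.map splitExt
  let bases := PySem.List.dedup (pairs.map (fun p => p.1))
  bases.map (fun b => (b, (pairs.filter (fun p => p.1 == b)).map (fun p => p.2)))

-- ===== PRECONDITION & SPEC =====
def Spec_get_filetypes (fnames : List String) (out : List (String × List String)) : Prop := out = get_filetypes_alt fnames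
instance (fnames : List String) (out : List (String × List String)) : Decidable (Spec_get_filetypes fnames out) := by unfold Spec_get_filetypes; infer_instance

-- ===== CLAIM (what is proved, stated in full; the proofs are below) =====
def Claim_equal_get_filetypes : Prop := ∀ (fnames : List String), Dom_get_filetypes fnames → Spec_get_filetypes fnames (get_filetypes fnames)

-- ===== LEMMAS AND PROOFS =====

-- [c] is a prefix of L.drop i iff L[i] = c
theorem pv_prefix_single {c : Char} {L : List Char} {i : ℕ} :
    [c] <+: L.drop i ↔ L[i]? = some c := by
  rw [← List.head?_drop]
  cases h : L.drop i with
  | nil => simp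
  | cons a t => simp [List.cons_prefix_cons, eq_comm]

-- a single character is an infix iff it is a member
theorem pv_singleton_infix {c : Char} {L : List Char} : [c] <:+: L ↔ c ∈ L := by
  constructor
  · intro h; exact h.sublist.mem (List.mem_singleton_self c)
  · intro h
    obtain ⟨i, hi⟩ := List.mem_iff_getElem?.mp h
    exact ((pv_prefix_single.mpr hi).isInfix).trans (List.drop_suffix i L).isInfix

-- if c does not occur, rfind.go returns -1
theorem pv_rfind_go_neg {c : Char} {L : List Char} (h : c ∉ L) :
    ∀ n : ℕ, PySem.Chars.rfind.go L [c] n = -1 := by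
  intro n
  induction n with
  | zero =>
    unfold PySem.Chars.rfind.go
    have : ¬ [c] <+: L.drop 0 := by
      rw [pv_prefix_single]; intro hc; exact h (List.mem_of_getElem? hc)
    simp only [List.drop_zero] at this
    simp [List.isPrefixOf_iff_prefix, this]
  | succ n ih =>
    unfold PySem.Chars.rfind.go
    have : ¬ [c] <+: L.drop (n+1) := by
      rw [pv_prefix_single]; intro hc; exact h (List.mem_of_getElem? hc)
    simp [List.isPrefixOf_iff_prefix, this, ih]

-- rfind.go returns j when L[j] = c and no later occurrence exists
theorem pv_rfind_go_last {c : Char} {L : List Char} {j : ℕ}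
    (hj : L[j]? = some c) (hlast : ∀ i, j < i → L[i]? ≠ some c) :
    ∀ n : ℕ, j ≤ n → PySem.Chars.rfind.go L [c] n = (j : Int) := by
  intro n
  induction n with
  | zero =>
    intro hn
    interval_cases j
    unfold PySem.Chars.rfind.go
    have : [c] <+: L.drop 0 := pv_prefix_single.mpr hj
    simp only [List.drop_zero] at this
    simp [List.isPrefixOf_iff_prefix, this]
  | succ n ih =>
    intro hn
    unfold PySem.Chars.rfind.go
    rcases Nat.lt_or_ge j (n+1) with hlt | hge
    · have : ¬ [c] <+: L.drop (n+1) := fun hc => hlast (n+1) hlt (pv_prefix_single.mp hc)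
      simp [List.isPrefixOf_iff_prefix, this, ih (by omega)]
    · have hje : j = n + 1 := by omega
      subst hje
      have : [c] <+: L.drop (n+1) := pv_prefix_single.mpr hj
      simp [List.isPrefixOf_iff_prefix, this]

-- A's reverse-find split equals B's rfind split on every string
theorem pv_split_eq (f : String) :
    (PySem.Str.slice f none
        (some (((PySem.Str.len f : Int) -
          PySem.Str.find ((PySem.Str.slice? f none none (-1)).getD "") ".") - 1)),
      PySem.Str.slice f
        (some ((PySem.Str.len f : Int) -
          PySem.Str.find ((PySem.Str.slice? f none none (-1)).getD "") ".")) none)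
      = splitExt f := by
  have hrev : (PySem.Str.slice? f none none (-1)).getD ""
      = String.ofList f.toList.reverse := by
    rw [PySem.Str.slice?_none_none_neg_one]; rfl
  rw [hrev]
  have hlen : (PySem.Str.len f : Int) = (f.toList.length : Int) := by simp
  have hfind : PySem.Str.find (String.ofList f.toList.reverse) "."
      = PySem.Chars.find f.toList.reverse ['.'] := by simp
  have hrfind : PySem.Str.rfind f "." = PySem.Chars.rfind f.toList ['.'] := by simp
  set L := f.toList with hL
  set n := L.length with hn
  by_cases hc : '.' ∈ L
  · -- there is a dot: both sides split at the last '.'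
    have hinf : ['.'] <:+: L.reverse := pv_singleton_infix.mpr (by simpa using hc)
    have hnn : 0 ≤ PySem.Chars.find L.reverse ['.'] :=
      (PySem.Chars.find_nonneg_iff _ _).mpr hinf
    obtain ⟨hpre, hmin⟩ := PySem.Chars.find_spec hnn
    set v := (PySem.Chars.find L.reverse ['.']).toNat with hv
    have hrv : (L.reverse)[v]? = some '.' := pv_prefix_single.mp hpre
    have hvlt : v < n := by
      have := (List.getElem?_eq_some_iff.mp hrv).1
      simpa [hn] using this
    have hLj : L[n - 1 - v]? = some '.' := by
      rw [← List.getElem?_reverse (by omega)]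
      simpa [hn] using hrv
    have hlast : ∀ i, n - 1 - v < i → L[i]? ≠ some '.' := by
      intro i hi hcon
      have hiL : i < n := by
        have := (List.getElem?_eq_some_iff.mp hcon).1
        simpa [hn] using this
      have hri : (L.reverse)[n - 1 - i]? = some '.' := by
        rw [List.getElem?_reverse (by omega)]
        have he : L.length - 1 - (n - 1 - i) = i := by omega
        rw [he]; exact hcon
      exact hmin (n - 1 - i) (by omega) (pv_prefix_single.mpr hri)
    have hrf : PySem.Chars.rfind L ['.'] = ((n - 1 - v : ℕ) : Int) := by
      unfold PySem.Chars.rfind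
      exact pv_rfind_go_last hLj hlast n (by omega)
    have hfv : PySem.Chars.find L.reverse ['.'] = (v : Int) := by omega
    have hnotlt : ¬ ((n - 1 - v : ℕ) : Int) < 0 := by
      have := Int.natCast_nonneg (n - 1 - v); omega
    simp only [splitExt, hrfind, hrf, hfind, hfv, hlen, hnotlt, if_false]
    have h1 : ((n:Int) - v) - 1 = ((n - 1 - v : ℕ) : Int) := by omega
    have h2 : (n:Int) - v = ((n - 1 - v : ℕ) : Int) + 1 := by omega
    rw [h1, h2]
  · -- no dot: A yields (f[:len], f[len+1:]) = (f, ''), B yields (f, '')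
    have hfneg : PySem.Chars.find L.reverse ['.'] = -1 :=
      (PySem.Chars.find_eq_neg_one_iff _ _).mpr
        (fun h => hc (by simpa using pv_singleton_infix.mp h))
    have hrneg : PySem.Chars.rfind L ['.'] = -1 := by
      unfold PySem.Chars.rfind; exact pv_rfind_go_neg hc n
    have hlt : (-1 : Int) < 0 := by norm_num
    simp only [splitExt, hrfind, hrneg, hfind, hfneg, hlen, hlt, if_true]
    rw [Prod.mk.injEq]
    refine ⟨?_, ?_⟩
    · show PySem.Str.slice f none (some ((n:Int) - -1 - 1)) = f
      have : ((n:Int) - -1 - 1) = ((n:ℕ) : Int) := by omega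
      rw [this]
      unfold PySem.Str.slice
      rw [PySem.Chars.slice_eq_listSlice, PySem.List.slice_to_natCast, hn, hL,
        List.take_length]
      exact String.ofList_toList
    · show PySem.Str.slice f (some ((n:Int) - -1)) none = ""
      have : ((n:Int) - -1) = (((n+1 :ℕ)) : Int) := by omega
      rw [this]
      unfold PySem.Str.slice
      rw [PySem.Chars.slice_eq_listSlice, PySem.List.slice_from_natCast, hn, hL,
        List.drop_eq_nil_of_le (by omega)]

-- A's loop body is one dict-modify keyed by splitExt (insert of a fresh key = modify with default [])
theorem pv_stepA_eq (d : PySem.Dict String (List String)) (f : String) :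
    pvStepA d f = d.modify (splitExt f).1 [] (· ++ [(splitExt f).2]) := by
  have h1 := congrArg Prod.fst (pv_split_eq f)
  have h2 := congrArg Prod.snd (pv_split_eq f)
  simp only at h1 h2
  simp only [pvStepA, h1, h2]
  by_cases hcd : d.contains (splitExt f).1
  · simp [hcd]
  · have hg : d.getD (splitExt f).1 [] = [] :=
      PySem.Dict.getD_of_not_contains d [] (by simpa using hcd)
    simp [hcd, PySem.Dict.modify, hg]

-- ===== VERDICT (by name: the statement is the Claim_ definition above) =====
theorem get_filetypes_spec : Claim_equal_get_filetypes := by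
  intro fnames _
  show get_filetypes fnames = get_filetypes_alt fnames
  unfold get_filetypes get_filetypes_alt
  have hfun : pvStepA = fun d f => d.modify (splitExt f).1 [] (· ++ [(splitExt f).2]) :=
    funext fun d => funext fun f => pv_stepA_eq d f
  rw [hfun]
  have hfold :
      List.foldl (fun d f => d.modify (splitExt f).1 [] (· ++ [(splitExt f).2]))
        PySem.Dict.empty fnames
      = List.foldl (fun d (p : String × String) => d.modify p.1 [] (· ++ [p.2]))
        PySem.Dict.empty (fnames.map splitExt) :=
    (List.foldl_map (f := splitExt)
      (g := fun d (p : String × String) => d.modify p.1 [] (· ++ [p.2]))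
      (l := fnames) (init := PySem.Dict.empty)).symm
  rw [hfold]
  set P := fnames.map splitExt with hP
  set D := P.foldl (fun d p => d.modify p.1 [] (· ++ [p.2])) PySem.Dict.empty with hD
  have hkeys : D.keys = PySem.List.dedup (P.map (fun p => p.1)) := by
    rw [hD, PySem.Dict.keys_foldl_modify_key P (key := fun p => p.1) []
      (f := fun _ x => (· ++ [x.2])) PySem.Dict.empty]
    simp [PySem.Set.update, PySem.List.dedup, PySem.Set.ofList, PySem.Dict.keys_empty]
  have hnodup : D.keys.Nodup := by
    rw [hkeys, PySem.List.dedup_eq_ofList]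
    exact PySem.Set.nodup_ofList _
  have hgetD : ∀ c, D.getD c [] = (P.filter (fun p => p.1 == c)).map (fun p => p.2) := by
    intro c
    rw [hD, PySem.Dict.getD_foldl_modify_append P PySem.Dict.empty c]
    simp [PySem.Dict.getD_empty]
  rw [PySem.Dict.items_eq_map_keys D hnodup [], hkeys]
  exact List.map_congr_left (fun b _ => by rw [hgetD b])
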